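-- pv_equiv track=rewrite | github.com/SergeyZSV/hw_py_4 | task2.py | get_list_from_high
-- ===== SOURCE A (Python) =====
-- def get_list_from_high(in_list, index_of_start_high):
--     list_from_high = list()
--     start_element = in_list[index_of_start_high]
--     list_from_high.append(start_element)
--     for i in range(index_of_start_high, -1, -1):
--         if start_element > in_list[i]:
--             list_from_high.append(in_list[i])
--             start_element = in_list[i]
--     return list_from_high
-- ===== SOURCE B (Python) =====
-- def get_list_from_high(in_list, index_of_start_high):
--     mins = [in_list[index_of_start_high]]
--     for i in range(index_of_start_high, -1, -1):
--         mins.append(min(mins[-1], in_list[i]))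
--     out = []
--     for m in mins:
--         if not out or m != out[-1]:
--             out.append(m)
--     return out
-- ===== Notes on version B (the rewrite author's own statement) =====
-- stated objective: alternative
-- what changed: B replaces A's single interleaved compare-and-append scan with a build-then-collapse pipeline: one pass builds a running-minimum table seeded with the start element, a second pass collapses consecutive equal minima.
import Mathlib
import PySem

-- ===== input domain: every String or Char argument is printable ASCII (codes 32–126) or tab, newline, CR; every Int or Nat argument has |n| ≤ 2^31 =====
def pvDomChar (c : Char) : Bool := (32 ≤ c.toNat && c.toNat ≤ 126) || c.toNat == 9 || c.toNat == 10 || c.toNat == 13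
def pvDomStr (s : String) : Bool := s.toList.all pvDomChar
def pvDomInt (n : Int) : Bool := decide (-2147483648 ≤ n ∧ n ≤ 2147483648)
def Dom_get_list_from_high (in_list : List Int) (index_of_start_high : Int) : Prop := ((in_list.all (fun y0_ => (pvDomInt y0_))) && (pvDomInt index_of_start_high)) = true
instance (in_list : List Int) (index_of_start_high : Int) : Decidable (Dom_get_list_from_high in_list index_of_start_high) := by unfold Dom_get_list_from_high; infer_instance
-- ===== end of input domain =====

-- B collapses A's interleaved conditional scan into a running-minimum table plus a consecutive-dedupe pass (alternative decomposition, same cost).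

-- ===== PORT A =====
def get_list_from_high (in_list : List Int) (index_of_start_high : Int) : List Int :=
  let start := PySem.List.pyGetD in_list index_of_start_high 0
  let r := (PySem.List.pyRange index_of_start_high (-1) (-1)).foldl
    (fun (st : List Int × Int) i =>
      if st.2 > PySem.List.pyGetD in_list i 0 then
        (st.1 ++ [PySem.List.pyGetD in_list i 0], PySem.List.pyGetD in_list i 0)
      else st)
    ([start], start)
  r.1

-- ===== PORT B =====
-- state pairs carry the list together with its last element (Python's mins[-1] / out[-1])
def get_list_from_high_alt (in_list : List Int) (index_of_start_high : Int) : List Int :=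
  let start := PySem.List.pyGetD in_list index_of_start_high 0
  let mins := ((PySem.List.pyRange index_of_start_high (-1) (-1)).foldl
    (fun (st : List Int × Int) i =>
      (st.1 ++ [min st.2 (PySem.List.pyGetD in_list i 0)],
       min st.2 (PySem.List.pyGetD in_list i 0)))
    ([start], start)).1
  (mins.foldl
    (fun (st : List Int × Option Int) m =>
      if st.2 = none ∨ st.2 ≠ some m then (st.1 ++ [m], some m) else st)
    ([], none)).1

-- ===== PRECONDITION & SPEC =====
-- Pre_: the index must be a valid Python index (negative wraparound allowed); outside it A raises IndexError.
def Pre_get_list_from_high (in_list : List Int) (index_of_start_high : Int) : Prop :=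
  PySem.Raise.InRange in_list.length index_of_start_high
instance (in_list : List Int) (index_of_start_high : Int) : Decidable (Pre_get_list_from_high in_list index_of_start_high) := by unfold Pre_get_list_from_high; infer_instance
def pvWitness_get_list_from_high : List Int × Int := ([5, 3, 4, 2], 3)

def Spec_get_list_from_high (in_list : List Int) (index_of_start_high : Int) (out : List Int) : Prop := out = get_list_from_high_alt in_list index_of_start_high
instance (in_list : List Int) (index_of_start_high : Int) (out : List Int) : Decidable (Spec_get_list_from_high in_list index_of_start_high out) := by unfold Spec_get_list_from_high; infer_instance

-- ===== CLAIM (what is proved, stated in full; the proofs are below) =====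
def Claim_equal_get_list_from_high : Prop := ∀ (in_list : List Int) (index_of_start_high : Int), Dom_get_list_from_high in_list index_of_start_high → Pre_get_list_from_high in_list index_of_start_high → Spec_get_list_from_high in_list index_of_start_high (get_list_from_high in_list index_of_start_high)

-- ===== LEMMAS AND PROOFS =====

-- the strictly-decreasing subsequence below running bound m (what A collects)
def pvSD (m : Int) : List Int → List Int
  | [] => []
  | x :: xs => if m > x then x :: pvSD x xs else pvSD m xs

-- running minima starting from bound m (B's table, minus the seed)
def pvMins (m : Int) : List Int → List Int
  | [] => []
  | x :: xs => min m x :: pvMins (min m x) xs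

-- consecutive dedupe with previous kept value prev
def pvDD (prev : Int) : List Int → List Int
  | [] => []
  | x :: xs => if x ≠ prev then x :: pvDD x xs else pvDD prev xs

-- A's index fold, converted to a fold over the fetched values
theorem pvL_A_idx (xs : List Int) (l : List Int) (init : List Int × Int) :
    l.foldl (fun st i =>
      if st.2 > PySem.List.pyGetD xs i 0 then
        (st.1 ++ [PySem.List.pyGetD xs i 0], PySem.List.pyGetD xs i 0)
      else st) init
    = (l.map (fun j => PySem.List.pyGetD xs j 0)).foldl
      (fun st v => if st.2 > v then (st.1 ++ [v], v) else st) init := by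
  induction l generalizing init with
  | nil => rfl
  | cons i l ih => simp only [List.foldl_cons, List.map_cons, ih]

-- B's index fold, converted likewise
theorem pvL_B_idx (xs : List Int) (l : List Int) (init : List Int × Int) :
    l.foldl (fun st i =>
      (st.1 ++ [min st.2 (PySem.List.pyGetD xs i 0)], min st.2 (PySem.List.pyGetD xs i 0))) init
    = (l.map (fun j => PySem.List.pyGetD xs j 0)).foldl
      (fun st v => (st.1 ++ [min st.2 v], min st.2 v)) init := by
  induction l generalizing init with
  | nil => rfl
  | cons i l ih => simp only [List.foldl_cons, List.map_cons, ih]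

theorem pvL_foldA (seq : List Int) : ∀ (acc : List Int) (m : Int),
    (seq.foldl (fun (st : List Int × Int) v =>
      if st.2 > v then (st.1 ++ [v], v) else st) (acc, m)).1 = acc ++ pvSD m seq := by
  induction seq with
  | nil => intro acc m; simp [pvSD]
  | cons x xs ih =>
    intro acc m
    by_cases h : m > x
    · simp [List.foldl_cons, h, ih, pvSD]
    · simp [List.foldl_cons, h, ih, pvSD]

theorem pvL_foldMins (seq : List Int) : ∀ (acc : List Int) (m : Int),
    (seq.foldl (fun (st : List Int × Int) x =>
      (st.1 ++ [min st.2 x], min st.2 x)) (acc, m)).1 = acc ++ pvMins m seq := by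
  induction seq with
  | nil => intro acc m; simp [pvMins]
  | cons x xs ih =>
    intro acc m
    simp [List.foldl_cons, ih, pvMins]

theorem pvL_foldDD (rest : List Int) : ∀ (p : Int) (acc : List Int),
    (rest.foldl
      (fun (st : List Int × Option Int) m =>
        if st.2 = none ∨ st.2 ≠ some m then (st.1 ++ [m], some m) else st)
      (acc, some p)).1 = acc ++ pvDD p rest := by
  induction rest with
  | nil => intro p acc; simp [pvDD]
  | cons x xs ih =>
    intro p acc
    by_cases h : x = p
    · subst h; simp [List.foldl_cons, ih, pvDD]
    · simp [List.foldl_cons, ih, pvDD, h, Ne.symm h]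

theorem pvL_dd_mins (seq : List Int) : ∀ (m : Int), pvDD m (pvMins m seq) = pvSD m seq := by
  induction seq with
  | nil => intro m; simp [pvMins, pvSD, pvDD]
  | cons x xs ih =>
    intro m
    by_cases h : m > x
    · have hmin : min m x = x := by omega
      simp [pvMins, pvSD, pvDD, hmin, h, ih]
      omega
    · have hmin : min m x = m := by omega
      simp [pvMins, pvSD, pvDD, hmin, h, ih]

-- ===== VERDICT (by name: the statement is the Claim_ definition above) =====
theorem get_list_from_high_spec : Claim_equal_get_list_from_high := by
  intro in_list idx _ _
  unfold Spec_get_list_from_high get_list_from_high get_list_from_high_alt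
  simp only [pvL_A_idx, pvL_B_idx]
  set start := PySem.List.pyGetD in_list idx 0 with hs
  set seq := (PySem.List.pyRange idx (-1) (-1)).map (fun j => PySem.List.pyGetD in_list j 0) with hq
  rw [pvL_foldA, pvL_foldMins]
  simp only [List.singleton_append, List.foldl_cons]
  rw [if_pos (Or.inl trivial), List.nil_append, pvL_foldDD, pvL_dd_mins]
  simp
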